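-- pv_equiv track=rewrite | github.com/shravanasati/advent-of-code | 2025/day9/b.py | _build_crossings_by_y
-- ===== SOURCE A (Python) =====
-- from typing import DefaultDict, Iterable
--
-- def _build_crossings_by_y(
--     vertical_edges: list[tuple[int, int, int]], ys: Iterable[int]
-- ):
--     """For a horizontal ray-cast at integer y, use the half-open rule [y_low, y_high)."""
--     crossings: dict[int, list[int]] = {}
--     for y in ys:
--         xs: list[int] = []
--         for x, y_low, y_high in vertical_edges:
--             if y_low <= y < y_high:
--                 xs.append(x)
--         xs.sort()
--         crossings[y] = xs
--     return crossings
-- ===== SOURCE B (Python) =====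
-- def _build_crossings_by_y(vertical_edges, ys):
--     # Swapped loop order: seed every y with an empty list, then make ONE pass
--     # over the edges in increasing-x order, appending x to each y it crosses;
--     # each per-y list is therefore built already sorted (no per-y sort).
--     crossings = {y: [] for y in ys}
--     for x, y_low, y_high in sorted(vertical_edges, key=lambda e: e[0]):
--         for y in crossings:
--             if y_low <= y < y_high:
--                 crossings[y].append(x)
--     return crossings
-- ===== Notes on version B (the rewrite author's own statement) =====
-- stated objective: alternative
-- what changed: B swaps the loop nesting: it seeds each y with an empty list, then makes a single pass over the edges sorted by x, appending x to every y the edge crosses, so each per-y list comes out sorted without a per-y sort.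
import Mathlib
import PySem

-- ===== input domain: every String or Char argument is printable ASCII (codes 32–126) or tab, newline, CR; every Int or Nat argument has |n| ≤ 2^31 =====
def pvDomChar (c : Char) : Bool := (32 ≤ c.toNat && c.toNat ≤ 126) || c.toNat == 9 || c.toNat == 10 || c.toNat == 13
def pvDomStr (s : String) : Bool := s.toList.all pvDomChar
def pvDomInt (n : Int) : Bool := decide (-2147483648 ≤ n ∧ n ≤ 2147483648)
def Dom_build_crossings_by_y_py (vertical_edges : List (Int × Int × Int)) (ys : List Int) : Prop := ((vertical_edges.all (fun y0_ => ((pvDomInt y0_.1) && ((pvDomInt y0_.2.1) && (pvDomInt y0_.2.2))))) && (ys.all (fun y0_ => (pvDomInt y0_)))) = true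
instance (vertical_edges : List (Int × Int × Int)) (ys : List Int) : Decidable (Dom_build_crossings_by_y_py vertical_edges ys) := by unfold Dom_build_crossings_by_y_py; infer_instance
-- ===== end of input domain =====

-- B swaps the loop nesting: seed each y with an empty list, then one pass over the edges
-- sorted by x appends x into every crossed y's list; return values proved equal (no speed claim).

-- ===== PORT A =====
-- 'for y in ys: xs = [..filter..]; xs.sort(); crossings[y] = xs'
def build_crossings_by_y_py (vertical_edges : List (Int × Int × Int)) (ys : List Int) : List (Int × List Int) :=
  (ys.foldl (fun crossings y =>
    let xs : List Int := vertical_edges.foldl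
      (fun xs e => if decide (e.2.1 ≤ y ∧ y < e.2.2) then xs ++ [e.1] else xs) []
    PySem.Dict.insert crossings y (PySem.List.sorted xs (fun x => x) false)) PySem.Dict.empty).items

-- ===== PORT B =====
-- 'crossings = {y: [] for y in ys}', then 'for x, y_low, y_high in sorted(vertical_edges, key=lambda e: e[0]):
--    for y in crossings: if y_low <= y < y_high: crossings[y].append(x)'
def build_crossings_by_y_py_alt (vertical_edges : List (Int × Int × Int)) (ys : List Int) : List (Int × List Int) :=
  let init : PySem.Dict Int (List Int) :=
    ys.foldl (fun d y => PySem.Dict.insert d y ([] : List Int)) PySem.Dict.empty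
  ((PySem.List.sorted vertical_edges (fun e => e.1) false).foldl
    (fun d e =>
      d.keys.foldl (fun d2 y =>
        if decide (e.2.1 ≤ y ∧ y < e.2.2)
        then PySem.Dict.modify d2 y ([] : List Int) (fun xs => xs ++ [e.1])
        else d2) d)
    init).items

-- ===== PRECONDITION & SPEC =====
def Spec_build_crossings_by_y_py (vertical_edges : List (Int × Int × Int)) (ys : List Int) (out : List (Int × List Int)) : Prop := out = build_crossings_by_y_py_alt vertical_edges ys
instance (vertical_edges : List (Int × Int × Int)) (ys : List Int) (out : List (Int × List Int)) : Decidable (Spec_build_crossings_by_y_py vertical_edges ys out) := by unfold Spec_build_crossings_by_y_py; infer_instance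

-- ===== CLAIM =====
def Claim_equal_build_crossings_by_y_py : Prop := ∀ (vertical_edges : List (Int × Int × Int)) (ys : List Int), Dom_build_crossings_by_y_py vertical_edges ys → Spec_build_crossings_by_y_py vertical_edges ys (build_crossings_by_y_py vertical_edges ys)

-- ===== LEMMAS AND PROOFS =====

-- crossing test for edge e at height y
def pvCond (e : Int × Int × Int) (y : Int) : Bool := decide (e.2.1 ≤ y ∧ y < e.2.2)

-- one append at a key already present: items updated in place at that key
theorem pv_modify_items (d : PySem.Dict Int (List Int)) (y x : Int)
    (hc : d.contains y = true) (hnd : d.keys.Nodup) :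
    (PySem.Dict.modify d y ([] : List Int) (fun xs => xs ++ [x])).items
      = d.items.map (fun p => if p.1 = y then (p.1, p.2 ++ [x]) else p) := by
  unfold PySem.Dict.modify
  rw [PySem.Dict.items_insert_of_contains d _ hc]
  apply List.map_congr_left
  intro p hp
  by_cases h : p.1 = y
  · have hv : d.getD y ([] : List Int) = p.2 := by
      have hm : (y, p.2) ∈ d.items := by rw [← h]; exact hp
      exact PySem.Dict.getD_of_mem_items d hm hnd _
    simp [h, hv]
  · simp [h]

-- the inner 'for y in crossings' loop for a fixed edge, over a nodup key list
theorem pv_keys_fold_items (c : Int → Bool) (x : Int) :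
    ∀ (ks : List Int) (d : PySem.Dict Int (List Int)), ks.Nodup →
      (∀ y ∈ ks, d.contains y = true) → d.keys.Nodup →
      (ks.foldl (fun d2 y =>
        if c y then PySem.Dict.modify d2 y ([] : List Int) (fun xs => xs ++ [x]) else d2) d).items
      = d.items.map (fun p => if c p.1 ∧ p.1 ∈ ks then (p.1, p.2 ++ [x]) else p) := by
  intro ks
  induction ks with
  | nil => intro d _ _ _; simp
  | cons y ks ih =>
    intro d hnd hcon hk
    have hyks : y ∉ ks := (List.nodup_cons.mp hnd).1
    have hndks : ks.Nodup := (List.nodup_cons.mp hnd).2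
    have hcy0 : d.contains y = true := hcon y (List.mem_cons_self)
    simp only [List.foldl_cons]
    by_cases hcy : c y = true
    · rw [if_pos hcy]
      have hkeys' : (PySem.Dict.modify d y ([] : List Int) (fun xs => xs ++ [x])).keys = d.keys := by
        rw [PySem.Dict.keys_modify]
        exact PySem.Dict.keys_insert_of_contains d _ hcy0
      rw [ih _ hndks (by
            intro z hz
            rw [PySem.Dict.contains_modify]
            simp [hcon z (List.mem_cons_of_mem _ hz)])
          (by rw [hkeys']; exact hk)]
      rw [pv_modify_items d y x hcy0 hk, List.map_map]
      apply List.map_congr_left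
      intro p hp
      by_cases hpy : p.1 = y
      · simp [Function.comp, hpy, hcy, hyks]
      · simp only [Function.comp_apply, if_neg hpy]
        by_cases hcp : c p.1 = true
        · simp [hcp, List.mem_cons, hpy]
        · simp [hcp]
    · rw [if_neg hcy]
      rw [ih _ hndks (fun z hz => hcon z (List.mem_cons_of_mem _ hz)) hk]
      apply List.map_congr_left
      intro p hp
      by_cases hpy : p.1 = y
      · simp [hpy, hcy]
      · simp [List.mem_cons, hpy]

-- one edge of B's outer loop, as a map over the items
theorem pv_step_items (d : PySem.Dict Int (List Int)) (e : Int × Int × Int) (hnd : d.keys.Nodup) :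
    (d.keys.foldl (fun d2 y =>
        if decide (e.2.1 ≤ y ∧ y < e.2.2)
        then PySem.Dict.modify d2 y ([] : List Int) (fun xs => xs ++ [e.1]) else d2) d).items
      = d.items.map (fun p => (p.1, if pvCond e p.1 then p.2 ++ [e.1] else p.2)) := by
  rw [pv_keys_fold_items (fun y => decide (e.2.1 ≤ y ∧ y < e.2.2)) e.1 d.keys d hnd
      (fun y hy => (PySem.Dict.contains_iff_mem_keys d y).mpr hy) hnd]
  apply List.map_congr_left
  intro p hp
  have hpk : p.1 ∈ d.keys := PySem.Dict.mem_keys_of_mem_items d hp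
  by_cases hc : pvCond e p.1 = true
  · simp only [pvCond] at hc
    simp [hc, hpk, pvCond]
  · simp only [pvCond] at hc
    simp [hc, pvCond]

-- B's whole edge loop appends, per key, the x's of the crossing edges in list order
theorem pv_edges_fold (L : List (Int × Int × Int)) :
    ∀ (d : PySem.Dict Int (List Int)), d.keys.Nodup →
      (L.foldl (fun d e =>
        d.keys.foldl (fun d2 y =>
          if decide (e.2.1 ≤ y ∧ y < e.2.2)
          then PySem.Dict.modify d2 y ([] : List Int) (fun xs => xs ++ [e.1]) else d2) d) d).items
      = d.items.map (fun p => (p.1, p.2 ++ (L.filter (fun e => pvCond e p.1)).map (·.1))) := by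
  induction L with
  | nil => intro d _; simp
  | cons e L ih =>
    intro d hnd
    simp only [List.foldl_cons]
    have hstep := pv_step_items d e hnd
    have hkeys : (d.keys.foldl (fun d2 y =>
        if decide (e.2.1 ≤ y ∧ y < e.2.2)
        then PySem.Dict.modify d2 y ([] : List Int) (fun xs => xs ++ [e.1]) else d2) d).keys = d.keys := by
      have h2 := congrArg (List.map (fun p : Int × List Int => p.1)) hstep
      rw [List.map_map] at h2
      exact h2
    rw [ih _ (by rw [hkeys]; exact hnd), hstep, List.map_map]
    apply List.map_congr_left
    intro p hp
    by_cases hc : pvCond e p.1 = true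
    · simp [Function.comp, hc, List.append_assoc]
    · simp [Function.comp, hc]

-- through a fold of inserts whose value depends only on the key, every item satisfies value = g key
theorem pv_ins_val (g : Int → List Int) :
    ∀ (ys : List Int) (d : PySem.Dict Int (List Int)),
      (∀ p ∈ d.items, p.2 = g p.1) →
      ∀ p ∈ (ys.foldl (fun d y => PySem.Dict.insert d y (g y)) d).items, p.2 = g p.1 := by
  intro ys
  induction ys with
  | nil => intro d h; simpa using h
  | cons y ys ih =>
    intro d h
    simp only [List.foldl_cons]
    apply ih
    intro p hp
    rcases (PySem.Dict.mem_items_insert d y (g y) p).mp hp with h1 | h2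
    · rw [h1]
    · exact h p h2.1

-- a fold of inserts with key-determined values, from empty: items = deduped keys paired with g
theorem pv_insert_fold_items (g : Int → List Int) (ys : List Int) :
    (ys.foldl (fun d y => PySem.Dict.insert d y (g y)) PySem.Dict.empty).items
      = (PySem.Set.update ([] : PySem.Set Int) ys).map (fun y => (y, g y)) := by
  have hkeys : (ys.foldl (fun d y => PySem.Dict.insert d y (g y)) PySem.Dict.empty).keys
      = PySem.Set.update ([] : PySem.Set Int) ys := by
    have := PySem.Dict.keys_foldl_insert (ν := List Int) ys (fun _ y => g y) PySem.Dict.empty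
    simpa using this
  have hnd : (ys.foldl (fun d y => PySem.Dict.insert d y (g y)) PySem.Dict.empty).keys.Nodup := by
    have := PySem.Dict.nodup_keys_foldl_insert (ν := List Int) ys (fun _ y => g y) PySem.Dict.empty
      (by simp)
    simpa using this
  have hval := pv_ins_val g ys PySem.Dict.empty (by simp [PySem.Dict.empty])
  have hitems := PySem.Dict.items_eq_map_keys _ hnd ([] : List Int)
  rw [hitems, hkeys]
  apply List.map_congr_left
  intro k hk
  have hmem : (k, (ys.foldl (fun d y => PySem.Dict.insert d y (g y)) PySem.Dict.empty).getD k []) ∈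
      (ys.foldl (fun d y => PySem.Dict.insert d y (g y)) PySem.Dict.empty).items := by
    rw [hitems, hkeys]
    exact List.mem_map_of_mem hk
  have := hval _ hmem
  simp only at this
  rw [this]

-- per-y value: A's sort-after-filter equals the x's of the crossing edges of the x-sorted list
theorem pv_val_eq (ve : List (Int × Int × Int)) (y : Int) :
    PySem.List.sorted
      (ve.foldl (fun xs e => if decide (e.2.1 ≤ y ∧ y < e.2.2) then xs ++ [e.1] else xs) [])
      (fun x => x) false
    = ((PySem.List.sorted ve (fun e => e.1) false).filter (fun e => pvCond e y)).map (·.1) := by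
  rw [PySem.List.foldl_append_if (fun e : Int × Int × Int => decide (e.2.1 ≤ y ∧ y < e.2.2))
      (fun e : Int × Int × Int => e.1) ve []]
  simp only [List.nil_append]
  apply PySem.List.sorted_id_eq_of_perm_of_pairwise
  · exact (((PySem.List.sorted_perm ve (fun e => e.1) false).filter _).map _)
  · have h := PySem.List.sorted_pairwise ve (fun e => e.1)
    exact List.pairwise_map.mpr (h.sublist List.filter_sublist)

theorem build_crossings_by_y_py_eq (ve : List (Int × Int × Int)) (ys : List Int) :
    build_crossings_by_y_py ve ys = build_crossings_by_y_py_alt ve ys := by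
  unfold build_crossings_by_y_py build_crossings_by_y_py_alt
  show (ys.foldl (fun d y => PySem.Dict.insert d y (PySem.List.sorted
        (ve.foldl (fun xs e => if decide (e.2.1 ≤ y ∧ y < e.2.2) then xs ++ [e.1] else xs) [])
        (fun x => x) false)) PySem.Dict.empty).items
      = ((PySem.List.sorted ve (fun e => e.1) false).foldl
          (fun d e => d.keys.foldl (fun d2 y =>
            if decide (e.2.1 ≤ y ∧ y < e.2.2)
            then PySem.Dict.modify d2 y ([] : List Int) (fun xs => xs ++ [e.1]) else d2) d)
          (ys.foldl (fun d y => PySem.Dict.insert d y ([] : List Int)) PySem.Dict.empty)).items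
  have hInd : (ys.foldl (fun d y => PySem.Dict.insert d y ([] : List Int)) PySem.Dict.empty).keys.Nodup := by
    have := PySem.Dict.nodup_keys_foldl_insert (ν := List Int) ys
      (fun _ _ => ([] : List Int)) PySem.Dict.empty (by simp)
    simpa using this
  rw [pv_edges_fold _ _ hInd,
      pv_insert_fold_items (fun _ => ([] : List Int)) ys,
      pv_insert_fold_items (fun y => PySem.List.sorted
        (ve.foldl (fun xs e => if decide (e.2.1 ≤ y ∧ y < e.2.2) then xs ++ [e.1] else xs) [])
        (fun x => x) false) ys,
      List.map_map]
  apply List.map_congr_left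
  intro k hk
  simp only [Function.comp_apply, List.nil_append]
  rw [pv_val_eq ve k]

-- ===== VERDICT =====
theorem build_crossings_by_y_py_spec : Claim_equal_build_crossings_by_y_py := by
  intro ve ys _
  unfold Spec_build_crossings_by_y_py
  exact build_crossings_by_y_py_eq ve ys
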